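-- pv_equiv track=rewrite | github.com/sergiogastelump/numeria-datamind | logic/logic/utils.py | simple_gematria
-- ===== SOURCE A (Python) =====
-- import string
--
-- def simple_gematria(text: str) -> int:
--     """
--     Suma A=1, B=2... Z=26, ignora espacios.
--     """
--     text = text.upper()
--     letters = string.ascii_uppercase
--     value = 0
--     for ch in text:
--         if ch in letters:
--             value += (letters.index(ch) + 1)
--     return value
-- ===== SOURCE B (Python) =====
-- from collections import Counter
--
-- def simple_gematria(text: str) -> int:
--     # histogram first, then one count-weighted pass over the distinct characters
--     counts = Counter(text.upper())
--     total = 0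
--     for ch, n in counts.items():
--         if 'A' <= ch <= 'Z':
--             total += (ord(ch) - 64) * n
--     return total
-- ===== Notes on version B (the rewrite author's own statement) =====
-- stated objective: faster
-- what changed: Replaces the per-character scan with letters.index inside the loop by a frequency table (Counter) built once, then a single count-weighted sum over the distinct characters using the arithmetic value ord(ch)-64 instead of an index lookup.
import Mathlib
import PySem

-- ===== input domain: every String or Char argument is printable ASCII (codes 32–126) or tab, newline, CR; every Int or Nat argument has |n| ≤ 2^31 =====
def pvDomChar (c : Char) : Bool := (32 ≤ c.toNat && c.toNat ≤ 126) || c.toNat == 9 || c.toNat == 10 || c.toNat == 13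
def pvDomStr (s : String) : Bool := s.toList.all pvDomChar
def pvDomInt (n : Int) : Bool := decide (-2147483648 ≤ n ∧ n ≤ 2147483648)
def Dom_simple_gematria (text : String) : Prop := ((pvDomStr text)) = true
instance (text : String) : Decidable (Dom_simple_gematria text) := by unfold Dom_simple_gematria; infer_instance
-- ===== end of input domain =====

-- B replaces A's per-character index scan by a Counter histogram plus one count-weighted
-- pass over the distinct characters (objective: alternative decomposition).

-- ===== PORT A =====
-- string.ascii_uppercase
def pvLettersA : List Char := ['A', 'B', 'C', 'D', 'E', 'F', 'G', 'H', 'I', 'J', 'K', 'L', 'M', 'N', 'O', 'P', 'Q', 'R', 'S', 'T', 'U', 'V', 'W', 'X', 'Y', 'Z']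

def simple_gematria (text : String) : Int :=
  (PySem.Str.upper text).toList.foldl
    (fun value ch =>
      if pvLettersA.contains ch then
        value + (((PySem.List.index? pvLettersA ch).getD 0 : Nat) + 1 : Int)
      else value) 0

-- ===== PORT B =====
def simple_gematria_alt (text : String) : Int :=
  let counts := PySem.Dict.counter (PySem.Str.upper text).toList
  counts.items.foldl
    (fun total p =>
      if 'A' ≤ p.1 ∧ p.1 ≤ 'Z' then total + ((p.1.toNat : Int) - 64) * p.2 else total) 0

-- ===== PRECONDITION & SPEC =====
def Spec_simple_gematria (text : String) (out : Int) : Prop := out = simple_gematria_alt text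
instance (text : String) (out : Int) : Decidable (Spec_simple_gematria text out) := by unfold Spec_simple_gematria; infer_instance

-- ===== CLAIM (what is proved, stated in full; the proofs are below) =====
def Claim_equal_simple_gematria : Prop := ∀ (text : String), Dom_simple_gematria text → Spec_simple_gematria text (simple_gematria text)

-- ===== LEMMAS AND PROOFS =====

-- the common per-character value: the gematria weight of a character
def pvVal (ch : Char) : Int := if 'A' ≤ ch ∧ ch ≤ 'Z' then (ch.toNat : Int) - 64 else 0

theorem pv_foldl_add {α : Type} (f : α → Int) (xs : List α) (init : Int)
    (step : Int → α → Int) (hstep : ∀ v c, step v c = v + f c) :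
    xs.foldl step init = init + (xs.map f).sum := by
  induction xs generalizing init with
  | nil => simp
  | cons x xs ih => simp [ih, hstep, add_assoc]

theorem pv_stepA (ch : Char) :
    (if pvLettersA.contains ch then (((PySem.List.index? pvLettersA ch).getD 0 : Nat) + 1 : Int) else 0)
      = pvVal ch := by
  by_cases hm : ch ∈ pvLettersA
  · fin_cases hm <;> decide
  · rw [if_neg (by simpa using hm)]
    have hno : ¬ ('A' ≤ ch ∧ ch ≤ 'Z') := by
      rintro ⟨h1, h2⟩
      apply hm
      have hA : 'A'.val.toNat = 65 := rfl
      have hB : 'B'.val.toNat = 66 := rfl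
      have hC : 'C'.val.toNat = 67 := rfl
      have hD : 'D'.val.toNat = 68 := rfl
      have hE : 'E'.val.toNat = 69 := rfl
      have hF : 'F'.val.toNat = 70 := rfl
      have hG : 'G'.val.toNat = 71 := rfl
      have hH : 'H'.val.toNat = 72 := rfl
      have hI : 'I'.val.toNat = 73 := rfl
      have hJ : 'J'.val.toNat = 74 := rfl
      have hK : 'K'.val.toNat = 75 := rfl
      have hL : 'L'.val.toNat = 76 := rfl
      have hM : 'M'.val.toNat = 77 := rfl
      have hN : 'N'.val.toNat = 78 := rfl
      have hO : 'O'.val.toNat = 79 := rfl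
      have hP : 'P'.val.toNat = 80 := rfl
      have hQ : 'Q'.val.toNat = 81 := rfl
      have hR : 'R'.val.toNat = 82 := rfl
      have hS : 'S'.val.toNat = 83 := rfl
      have hT : 'T'.val.toNat = 84 := rfl
      have hU : 'U'.val.toNat = 85 := rfl
      have hV : 'V'.val.toNat = 86 := rfl
      have hW : 'W'.val.toNat = 87 := rfl
      have hX : 'X'.val.toNat = 88 := rfl
      have hY : 'Y'.val.toNat = 89 := rfl
      have hZ : 'Z'.val.toNat = 90 := rfl
      simp only [pvLettersA, List.mem_cons, List.not_mem_nil, or_false, Char.ext_iff,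
        Char.le_def, UInt32.le_iff_toNat_le, UInt32.ext_iff] at h1 h2 ⊢
      omega
    simp [pvVal, hno]

theorem pv_sum_filter_split (l : List Char) (f : Char → Int) (p : Char → Bool) :
    (((l.filter p).map f).sum + ((l.filter (fun k => !p k)).map f).sum) = (l.map f).sum := by
  induction l with
  | nil => simp
  | cons x xs ih =>
    by_cases hx : p x <;> simp [hx, ← ih] <;> ring

theorem pv_sum_filter_eq (l : List Char) (x : Char) (f : Char → Int) (h : l.Nodup) :
    ((l.filter (fun k => k == x)).map f).sum = if x ∈ l then f x else 0 := by
  induction l with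
  | nil => simp
  | cons y ys ih =>
    rcases List.nodup_cons.mp h with ⟨hy, hys⟩
    by_cases hyx : y = x
    · subst hyx
      have hnil : ys.filter (fun k => k == y) = [] := by
        apply List.filter_eq_nil_iff.mpr
        intro a ha
        simp only [beq_iff_eq]
        intro hay; exact hy (hay ▸ ha)
      simp [hnil]
    · simp only [List.filter_cons, beq_iff_eq, hyx, if_false, List.mem_cons]
      rw [ih hys]
      have hxy : ¬ x = y := fun h' => hyx h'.symm
      simp [hxy]

theorem pv_key (xs : List Char) (g : Char → Int) :
    ((PySem.Set.ofList xs).map (fun k => ((xs.count k : Int)) * g k)).sum = (xs.map g).sum := by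
  induction xs with
  | nil => simp [PySem.Set.ofList_nil]
  | cons x xs ih =>
    rw [PySem.Set.ofList_cons]
    have hdis : PySem.Set.discard (PySem.Set.ofList xs) x
        = (PySem.Set.ofList xs).filter (fun y => !(y == x)) := rfl
    have hnd : (PySem.Set.ofList xs).Nodup := PySem.Set.nodup_ofList xs
    simp only [List.map_cons, List.sum_cons, List.map_cons, hdis]
    -- on the discard part, the counts in x :: xs equal the counts in xs
    have hcnt : (((PySem.Set.ofList xs).filter (fun y => !(y == x))).map
          (fun k => (((x :: xs).count k : Int)) * g k)).sum
        = (((PySem.Set.ofList xs).filter (fun y => !(y == x))).map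
          (fun k => ((xs.count k : Int)) * g k)).sum := by
      apply congrArg
      apply List.map_congr_left
      intro k hk
      have hkx : ¬ (k == x) = true := by
        have := (List.mem_filter.mp hk).2
        simpa using this
      have : (x :: xs).count k = xs.count k := by
        rw [List.count_cons]
        simp only [beq_iff_eq]
        have hkx' : ¬ k = x := by simpa using hkx
        have hxk : ¬ x = k := fun h' => hkx' h'.symm
        simp [hxk]
      rw [this]
    rw [hcnt]
    have hsplit := pv_sum_filter_split (PySem.Set.ofList xs)
      (fun k => ((xs.count k : Int)) * g k) (fun k => k == x)
    have heq := pv_sum_filter_eq (PySem.Set.ofList xs) x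
      (fun k => ((xs.count k : Int)) * g k) hnd
    have hmem : x ∈ PySem.Set.ofList xs ↔ x ∈ xs := PySem.Set.mem_ofList _ _
    rw [List.count_cons_self]
    by_cases hx : x ∈ xs
    · rw [if_pos (hmem.mpr hx)] at heq
      push_cast
      linear_combination hsplit - heq + ih
    · rw [if_neg (fun h => hx (hmem.mp h))] at heq
      have hc0 : xs.count x = 0 := List.count_eq_zero.mpr hx
      rw [hc0]
      push_cast
      linear_combination hsplit - heq + ih

-- ===== VERDICT (by name: the statement is the Claim_ definition above) =====
theorem simple_gematria_spec : Claim_equal_simple_gematria := by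
  intro text _
  unfold Spec_simple_gematria simple_gematria simple_gematria_alt
  set xs := (PySem.Str.upper text).toList with hxs
  -- A's loop as a sum of per-character values
  rw [pv_foldl_add (fun ch => if pvLettersA.contains ch then
        (((PySem.List.index? pvLettersA ch).getD 0 : Nat) + 1 : Int) else 0) xs 0
      _ (by intro v c; by_cases h : c ∈ pvLettersA <;> simp [h])]
  -- B's loop as a sum over the counter's items
  rw [pv_foldl_add (fun p : Char × Int => if 'A' ≤ p.1 ∧ p.1 ≤ 'Z' then ((p.1.toNat : Int) - 64) * p.2 else 0)
      (PySem.Dict.counter xs).items 0 _ (by intro v c; by_cases h : 'A' ≤ c.1 ∧ c.1 ≤ 'Z' <;> simp [h])]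
  rw [PySem.Dict.items_counter]
  rw [List.map_map]
  have hpt : ((fun p : Char × Int => if 'A' ≤ p.1 ∧ p.1 ≤ 'Z' then ((p.1.toNat : Int) - 64) * p.2 else 0)
        ∘ (fun k => (k, (xs.count k : Int))))
      = fun k => ((xs.count k : Int)) * pvVal k := by
    funext k
    simp only [Function.comp, pvVal]
    split <;> ring
  rw [hpt, pv_key]
  simp only [zero_add]
  exact congrArg List.sum (List.map_congr_left (fun ch _ => pv_stepA ch))
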